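-- pv_equiv track=rewrite | github.com/cormoran/tdd_challenge | validate_addr.py | validate_quated_string
-- ===== SOURCE A (Python) =====
-- def validate_quated_string(quated_str):
--     # LQ5
--     if len(quated_str) < 2:
--         return False
--     # LQ1,2
--     if quated_str[0] != '"' or quated_str[-1] != '"':
--         return False
--     quated_str = quated_str[1:-1]
--     flg = True
--     prev_bs = False
--     for s in quated_str:
--         flg &= s in "abcdefghijklmnopqrstuvwxyzABCDEFGHIJKLMNOPQRSTUVWXYZ0123456789!#$%&'*+-/=?^_`{|}~(),.:;<>@[]\"\\"
--         if prev_bs: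
--             flg &= s == '"' or s == "\\"
--             prev_bs = False
--         else:
--             flg &= s != '"'
--             prev_bs = s == "\\"
--     return flg is True
-- ===== SOURCE B (Python) =====
-- ALLOWED = "abcdefghijklmnopqrstuvwxyzABCDEFGHIJKLMNOPQRSTUVWXYZ0123456789!#$%&'*+-/=?^_`{|}~(),.:;<>@[]\"\\"
--
--
-- def validate_quated_string(quated_str):
--     # length and surrounding-quote checks
--     if len(quated_str) < 2:
--         return False
--     if quated_str[0] != '"' or quated_str[-1] != '"':
--         return False
--     s = quated_str[1:-1]
--     m = len(s)
--     i = 0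
--     while i < m:
--         c = s[i]
--         if c not in ALLOWED:
--             return False
--         if c == "\\":
--             if i + 1 < m:
--                 if s[i + 1] != '"' and s[i + 1] != "\\":
--                     return False
--                 i += 2
--             else:
--                 # trailing backslash: nothing follows to escape; accepted
--                 i += 1
--         elif c == '"':
--             return False
--         else:
--             i += 1
--     return True
-- ===== Notes on version B (the rewrite author's own statement) =====
-- stated objective: alternative
-- what changed: Replaced A's full-scan fold carrying a (flg, prev_bs) flag pair by an index-advancing while loop that consumes a backslash escape as two characters at once and returns False at the first violation.
import Mathlib
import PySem

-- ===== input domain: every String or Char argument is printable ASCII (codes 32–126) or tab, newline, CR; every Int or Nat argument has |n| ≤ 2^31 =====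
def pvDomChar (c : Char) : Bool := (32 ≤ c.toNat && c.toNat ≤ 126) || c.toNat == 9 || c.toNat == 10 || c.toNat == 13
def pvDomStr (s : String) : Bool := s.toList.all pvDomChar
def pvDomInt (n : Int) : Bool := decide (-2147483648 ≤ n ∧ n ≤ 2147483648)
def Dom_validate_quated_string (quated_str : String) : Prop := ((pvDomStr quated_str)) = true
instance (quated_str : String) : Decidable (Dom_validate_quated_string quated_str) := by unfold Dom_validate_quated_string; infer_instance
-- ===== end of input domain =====

-- B replaces A's prev_bs-flag fold (which always scans the whole interior) by an
-- index-advancing while loop that consumes an escape as two characters and returns early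
-- on the first violation (objective: alternative decomposition, same cost).

-- the shared allowed-character literal from the Python source
def pvAllowed : List Char :=
  "abcdefghijklmnopqrstuvwxyzABCDEFGHIJKLMNOPQRSTUVWXYZ0123456789!#$%&'*+-/=?^_`{|}~(),.:;<>@[]\"\\".toList

-- ===== PORT A =====
-- A's loop body: state (flg, prev_bs)
def pvStepA (st : Bool × Bool) (s : Char) : Bool × Bool :=
  let flg := st.1 && pvAllowed.contains s
  if st.2 then (flg && (s == '"' || s == '\\'), false)
  else (flg && !(s == '"'), s == '\\')

def validate_quated_string (quated_str : String) : Bool :=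
  let l := quated_str.toList
  if l.length < 2 then false
  else if !(PySem.List.pyGet? l 0 == some '"') || !(PySem.List.pyGet? l (-1) == some '"') then false
  else
    let inner := PySem.List.slice l (some 1) (some (-1))
    (inner.foldl pvStepA (true, false)).1

-- ===== PORT B =====
-- Source B's while loop over index i; each branch advances i or returns
def pvGoB (l : List Char) (i : Nat) : Bool :=
  if h : i < l.length then
    let c := l[i]
    if !(pvAllowed.contains c) then false
    else if c == '\\' then
      if h2 : i + 1 < l.length then
        if !(l[i+1] == '"') && !(l[i+1] == '\\') then false
        else pvGoB l (i+2)
      else pvGoB l (i+1)     -- trailing backslash: i += 1, loop ends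
    else if c == '"' then false
    else pvGoB l (i+1)
  else true
termination_by l.length - i

def validate_quated_string_alt (quated_str : String) : Bool :=
  let l := quated_str.toList
  if l.length < 2 then false
  else if !(PySem.List.pyGet? l 0 == some '"') || !(PySem.List.pyGet? l (-1) == some '"') then false
  else pvGoB (PySem.List.slice l (some 1) (some (-1))) 0

-- ===== PRECONDITION & SPEC =====
def Spec_validate_quated_string (quated_str : String) (out : Bool) : Prop := out = validate_quated_string_alt quated_str
instance (quated_str : String) (out : Bool) : Decidable (Spec_validate_quated_string quated_str out) := by unfold Spec_validate_quated_string; infer_instance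

-- ===== CLAIM (what is proved, stated in full; the proofs are below) =====
def Claim_equal_validate_quated_string : Prop := ∀ (quated_str : String), Dom_validate_quated_string quated_str → Spec_validate_quated_string quated_str (validate_quated_string quated_str)

-- ===== LEMMAS AND PROOFS =====

-- once flg is False it stays False
theorem pv_foldA_false (l : List Char) : ∀ p, (l.foldl pvStepA (false, p)).1 = false := by
  induction l with
  | nil => intro p; rfl
  | cons c t ih =>
    intro p
    simp only [List.foldl_cons, pvStepA]
    cases p <;> simp [ih]

-- main invariant: A's fold over the suffix from i equals B's index loop at i
theorem pv_main (l : List Char) : ∀ k i, l.length - i ≤ k →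
    (List.foldl pvStepA (true, false) (l.drop i)).1 = pvGoB l i := by
  intro k
  induction k with
  | zero =>
    intro i hk
    have hle : l.length ≤ i := by omega
    rw [List.drop_eq_nil_of_le hle, pvGoB]
    simp [Nat.not_lt.mpr hle]
  | succ k ih =>
    intro i hk
    by_cases h : i < l.length
    · rw [List.drop_eq_getElem_cons h, pvGoB]
      simp only [h, dif_pos]
      generalize hc : l[i] = c
      by_cases hmem : pvAllowed.contains c = true
      · simp only [hmem, Bool.not_true, Bool.false_eq_true, if_false]
        by_cases hbs : c = '\\'
        · subst hbs
          simp only [List.foldl_cons, pvStepA, beq_self_eq_true, hmem]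
          norm_num
          by_cases h2 : i + 1 < l.length
          · rw [List.drop_eq_getElem_cons h2]
            simp only [h2, dif_pos, List.foldl_cons, pvStepA]
            generalize hd : l[i+1] = d
            by_cases hdq : d = '"'
            · subst hdq
              have : pvAllowed.contains '"' = true := by decide
              simp
              exact ih (i+2) (by omega)
            · by_cases hdb : d = '\\'
              · subst hdb
                simp
                exact ih (i+2) (by omega)
              · have hno : (d == '"' || d == '\\') = false := by simp [hdq, hdb]
                have hbo : (!(d == '"') && !(d == '\\')) = true := by simp [hdq, hdb]
                simp only [hno, Bool.and_false]
                simp [hdq, hdb]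
                exact pv_foldA_false _ _
          · have hlen : l.length ≤ i + 1 := by omega
            rw [List.drop_eq_nil_of_le hlen]
            have hg : pvGoB l (i+1) = true := by
              rw [pvGoB]; simp [Nat.not_lt.mpr hlen]
            simp [h2, hg]
        · by_cases hq : c = '"'
          · subst hq
            have hne : ('"' == '\\') = false := by decide
            simp only [hne, Bool.false_eq_true, if_false, beq_self_eq_true, if_true,
              List.foldl_cons, pvStepA, hmem]
            simp [pv_foldA_false]
          · have hb : (c == '\\') = false := by simp [hbs]
            have hqb : (c == '"') = false := by simp [hq]
            simp only [hb, Bool.false_eq_true, if_false, hqb, List.foldl_cons, pvStepA, hmem]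
            simp only [Bool.not_false, Bool.and_true]
            exact ih (i+1) (by omega)
      · simp only [Bool.not_eq_true] at hmem
        simp only [List.foldl_cons, pvStepA, hmem, Bool.false_and,
          Bool.and_false]
        cases hbq : (c == '\\') <;>
          simp [pv_foldA_false]
    · rw [List.drop_eq_nil_of_le (by omega), pvGoB]
      simp [h]

-- ===== VERDICT (by name: the statement is the Claim_ definition above) =====
theorem validate_quated_string_spec : Claim_equal_validate_quated_string := by
  intro q _
  unfold Spec_validate_quated_string validate_quated_string validate_quated_string_alt
  simp only []
  split_ifs with h1 h2
  · rfl
  · rfl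
  · have := pv_main (PySem.List.slice q.toList (some 1) (some (-1)))
      (PySem.List.slice q.toList (some 1) (some (-1))).length 0 (by omega)
    simpa using this
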